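-- pv_equiv track=rewrite | github.com/pdfix/action-pdf-accessibility-docling-docker | src/process_bboxes.py | _indexes_that_can_be_merged
-- ===== SOURCE A (Python) =====
-- def _indexes_that_can_be_merged(groups: list[set[int]]) -> tuple[int, int]:
--     """
--     Find if any two groups can be merged together.
--
--     Args:
--         groups (list[set[int]]): List of groups.
--
--     Returns:
--         If 2 groups can be merged return their indexes, otherwise return -1, -1
--     """
--     groups_size: int = len(groups)
--     for index1 in range(groups_size):
--         group1: set[int] = groups[index1]
--         for index2 in range(index1 + 1, groups_size):
--             group2: set[int] = groups[index2]
--             if group1 & group2: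
--                 return index1, index2
--     return -1, -1
-- ===== SOURCE B (Python) =====
-- def _indexes_that_can_be_merged(groups: list[set[int]]) -> tuple[int, int]:
--     """One pass with a hash index element -> first group containing it;
--     take the lexicographically smallest (first_occurrence, current) pair."""
--     first: dict[int, int] = {}
--     best: tuple[int, int] | None = None
--     for j, group in enumerate(groups):
--         for element in group:
--             i = first.setdefault(element, j)
--             if i != j and (best is None or (i, j) < best):
--                 best = (i, j)
--     return best if best is not None else (-1, -1)
-- ===== Notes on version B (the rewrite author's own statement) =====
-- stated objective: alternative
-- what changed: A scans all group pairs in nested loops and intersects each pair of sets; B makes one pass with a hash index element -> first group containing it, emitting a candidate (first_occurrence, current_index) per repeated element and keeping the lexicographically least, which equals A's first intersecting pair.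
import Mathlib
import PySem

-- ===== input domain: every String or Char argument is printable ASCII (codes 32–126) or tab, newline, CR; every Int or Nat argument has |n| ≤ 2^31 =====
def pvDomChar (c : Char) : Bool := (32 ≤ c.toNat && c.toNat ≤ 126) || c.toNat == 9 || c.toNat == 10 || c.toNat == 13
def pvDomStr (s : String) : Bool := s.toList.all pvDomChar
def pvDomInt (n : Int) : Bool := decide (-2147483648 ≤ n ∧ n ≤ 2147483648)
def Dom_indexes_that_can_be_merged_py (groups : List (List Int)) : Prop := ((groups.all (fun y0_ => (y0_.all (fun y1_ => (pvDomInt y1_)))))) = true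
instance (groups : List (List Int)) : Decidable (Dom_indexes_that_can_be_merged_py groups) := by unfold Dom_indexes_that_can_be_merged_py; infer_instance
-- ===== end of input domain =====

-- B replaces A's nested pairwise set-intersection scan by ONE pass with a hash index
-- element → first group containing it, keeping the lexicographically least candidate pair.

-- ===== PORT A =====
-- `if group1 & group2:` — nonempty intersection test
def pvInterHit (g1 g2 : List Int) : Bool :=
  g1.any (fun x => g2.contains x)

-- inner `for index2 in range(index1+1, groups_size)` with early return
def pvAInner (g1 : List Int) (i1 : Int) : List (List Int) → Int → Option (Int × Int)
  | [], _ => none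
  | g2 :: rest, j => if pvInterHit g1 g2 then some (i1, j) else pvAInner g1 i1 rest (j + 1)

-- outer `for index1 in range(groups_size)` with early return
def pvAOuter : List (List Int) → Int → Option (Int × Int)
  | [], _ => none
  | g1 :: rest, i =>
    match pvAInner g1 i rest (i + 1) with
    | some r => some r
    | none => pvAOuter rest (i + 1)

def indexes_that_can_be_merged_py (groups : List (List Int)) : List Int :=
  match pvAOuter groups 0 with
  | some (i, j) => [i, j]
  | none => [-1, -1]

-- ===== PORT B =====
-- tuple comparison `(i, j) < best`
def pvLtPair (a b : Int × Int) : Bool :=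
  a.1 < b.1 || (a.1 == b.1 && a.2 < b.2)

-- `if best is None or (i, j) < best: best = (i, j)`
def pvBBest (best : Option (Int × Int)) (c : Int × Int) : Option (Int × Int) :=
  match best with
  | none => some c
  | some b => if pvLtPair c b then some c else some b

-- `for element in group: i = first.setdefault(element, j); if i != j and …`
def pvBInner (j : Int) : List Int → PySem.Dict Int Int → Option (Int × Int) → PySem.Dict Int Int × Option (Int × Int)
  | [], first, best => (first, best)
  | e :: es, first, best =>
    match first.get? e with
    | some i =>
      if i == j then pvBInner j es first best
      else pvBInner j es first (pvBBest best (i, j))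
    | none => pvBInner j es (first.insert e j) best

-- `for j, group in enumerate(groups)`
def pvBOuter : List (List Int) → Int → PySem.Dict Int Int → Option (Int × Int) → Option (Int × Int)
  | [], _, _, best => best
  | g :: rest, j, first, best =>
    let st := pvBInner j g first best
    pvBOuter rest (j + 1) st.1 st.2

def indexes_that_can_be_merged_py_alt (groups : List (List Int)) : List Int :=
  match pvBOuter groups 0 PySem.Dict.empty none with
  | some (i, j) => [i, j]
  | none => [-1, -1]

-- ===== PRECONDITION & SPEC =====
def Spec_indexes_that_can_be_merged_py (groups : List (List Int)) (out : List Int) : Prop := out = indexes_that_can_be_merged_py_alt groups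
instance (groups : List (List Int)) (out : List Int) : Decidable (Spec_indexes_that_can_be_merged_py groups out) := by unfold Spec_indexes_that_can_be_merged_py; infer_instance

-- ===== CLAIM (what is proved, stated in full; the proofs are below) =====
def Claim_equal_indexes_that_can_be_merged_py : Prop := ∀ (groups : List (List Int)), Dom_indexes_that_can_be_merged_py groups → Spec_indexes_that_can_be_merged_py groups (indexes_that_can_be_merged_py groups)

-- ===== LEMMAS AND PROOFS =====

-- strict lexicographic order on pairs, as a Prop
def ltP (a b : Int × Int) : Prop := a.1 < b.1 ∨ (a.1 = b.1 ∧ a.2 < b.2)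

lemma pvLtPair_iff (a b : Int × Int) : pvLtPair a b = true ↔ ltP a b := by
  simp [pvLtPair, ltP]

lemma ltP_irrefl (a : Int × Int) : ¬ ltP a a := by
  obtain ⟨a1, a2⟩ := a; simp [ltP]

-- `o` is the lexicographic minimum of the list `l` (none ↔ empty)
def IsMinOf (o : Option (Int × Int)) (l : List (Int × Int)) : Prop :=
  match o with
  | none => l = []
  | some m => m ∈ l ∧ ∀ x ∈ l, ¬ ltP x m

lemma IsMinOf_none (l : List (Int × Int)) : IsMinOf none l ↔ l = [] := Iff.rfl

lemma IsMinOf_some (m : Int × Int) (l : List (Int × Int)) :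
    IsMinOf (some m) l ↔ m ∈ l ∧ ∀ x ∈ l, ¬ ltP x m := Iff.rfl

lemma isMinOf_unique {o1 o2 : Option (Int × Int)} {l : List (Int × Int)}
    (h1 : IsMinOf o1 l) (h2 : IsMinOf o2 l) : o1 = o2 := by
  cases o1 with
  | none =>
    cases o2 with
    | none => rfl
    | some m2 => simp [IsMinOf] at h1 h2; simp [h1] at h2
  | some m1 =>
    cases o2 with
    | none => simp [IsMinOf] at h1 h2; simp [h2] at h1
    | some m2 =>
      simp only [IsMinOf] at h1 h2
      obtain ⟨hm1, hmin1⟩ := h1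
      obtain ⟨hm2, hmin2⟩ := h2
      have h12 := hmin2 m1 hm1
      have h21 := hmin1 m2 hm2
      obtain ⟨a1, a2⟩ := m1
      obtain ⟨b1, b2⟩ := m2
      simp [ltP] at h12 h21
      have : a1 = b1 ∧ a2 = b2 := by constructor <;> omega
      simp [this.1, this.2]

lemma notLt_trans {a b c : Int × Int} (h1 : ¬ ltP b a) (h2 : ¬ ltP c b) : ¬ ltP c a := by
  obtain ⟨a1, a2⟩ := a; obtain ⟨b1, b2⟩ := b; obtain ⟨c1, c2⟩ := c
  simp [ltP] at *
  omega

-- folding pvBBest computes a minimum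
lemma foldl_best_none_iff (l : List (Int × Int)) (o : Option (Int × Int)) :
    l.foldl pvBBest o = none ↔ o = none ∧ l = [] := by
  induction l generalizing o with
  | nil => simp
  | cons c l ih =>
    simp only [List.foldl_cons, ih]
    constructor
    · rintro ⟨h, -⟩
      exfalso
      cases o <;> simp [pvBBest] at h
      split at h <;> simp_all
    · rintro ⟨-, h⟩; exact absurd h (by simp)

lemma foldl_best_some_mem (l : List (Int × Int)) (o : Option (Int × Int)) (m : Int × Int)
    (h : l.foldl pvBBest o = some m) : o = some m ∨ m ∈ l := by
  induction l generalizing o with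
  | nil => simp at h; simp [h]
  | cons c l ih =>
    simp only [List.foldl_cons] at h
    rcases ih _ h with h' | h'
    · cases o with
      | none => simp [pvBBest] at h'; simp [h']
      | some b =>
        simp only [pvBBest] at h'
        split at h' <;> simp_all
    · simp [h']

lemma foldl_best_some_le (l : List (Int × Int)) (o : Option (Int × Int)) (m : Int × Int)
    (h : l.foldl pvBBest o = some m) :
    (∀ x ∈ l, ¬ ltP x m) ∧ (∀ b, o = some b → ¬ ltP b m) := by
  induction l generalizing o with
  | nil =>
    simp only [List.foldl_nil] at h
    refine ⟨by simp, ?_⟩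
    intro b hb
    rw [h] at hb
    injection hb with hb
    subst hb
    exact ltP_irrefl m
  | cons c l ih =>
    simp only [List.foldl_cons] at h
    obtain ⟨hl, ho⟩ := ih _ h
    -- pvBBest o c = some b' with ¬ltP c b' and (o = some b → ¬ltP b b')
    have hb' : ∃ b', pvBBest o c = some b' ∧ ¬ ltP c b' ∧ (∀ b, o = some b → ¬ ltP b b') := by
      cases o with
      | none => exact ⟨c, by simp [pvBBest], ltP_irrefl c, by simp⟩
      | some b =>
        by_cases hcb : pvLtPair c b = true
        · refine ⟨c, by simp [pvBBest, hcb], ltP_irrefl c, ?_⟩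
          intro b'' hb''
          have hbb : b = b'' := by injection hb''
          rw [← hbb]
          rw [pvLtPair_iff] at hcb
          obtain ⟨c1, c2⟩ := c; obtain ⟨b1, b2⟩ := b
          simp [ltP] at *; omega
        · refine ⟨b, by simp [pvBBest, hcb], ?_, ?_⟩
          · rw [← pvLtPair_iff]; simpa using hcb
          · intro b'' hb''
            have hbb : b = b'' := by injection hb''
            rw [← hbb]
            exact ltP_irrefl b
    obtain ⟨b', hbeq, hcb', hob'⟩ := hb'
    have hb'm : ¬ ltP b' m := ho b' hbeq
    constructor
    · intro x hx
      rcases List.mem_cons.mp hx with rfl | hx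
      · exact notLt_trans hb'm hcb'
      · exact hl x hx
    · intro b hb
      exact notLt_trans hb'm (hob' b hb)

lemma foldl_best_isMin (l : List (Int × Int)) :
    IsMinOf (l.foldl pvBBest none) l := by
  cases h : l.foldl pvBBest none with
  | none =>
    simp only [IsMinOf]
    exact ((foldl_best_none_iff l none).mp h).2
  | some m =>
    simp only [IsMinOf]
    refine ⟨?_, (foldl_best_some_le l none m h).1⟩
    rcases foldl_best_some_mem l none m h with h' | h'
    · simp at h'
    · exact h'

-- minimum of one list is the minimum of another under mutual domination
lemma isMinOf_transfer {o : Option (Int × Int)} {C S : List (Int × Int)}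
    (h : IsMinOf o C)
    (hCS : ∀ p ∈ C, p ∈ S)
    (hSC : ∀ p ∈ S, ∃ q ∈ C, ¬ ltP p q) : IsMinOf o S := by
  cases o with
  | none =>
    simp only [IsMinOf] at *
    subst h
    cases S with
    | nil => rfl
    | cons s S => obtain ⟨q, hq, -⟩ := hSC s (by simp); simp at hq
  | some m =>
    simp only [IsMinOf] at *
    obtain ⟨hm, hmin⟩ := h
    refine ⟨hCS m hm, ?_⟩
    intro x hx
    obtain ⟨q, hq, hxq⟩ := hSC x hx
    exact notLt_trans (hmin q hq) hxq

-- ---------- A-side characterization ----------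

-- the intersecting pairs A's inner loop enumerates, in order
def hitsFrom (g1 : List Int) (i1 : Int) : List (List Int) → Int → List (Int × Int)
  | [], _ => []
  | g2 :: rest, j => (if pvInterHit g1 g2 then [(i1, j)] else []) ++ hitsFrom g1 i1 rest (j + 1)

-- all intersecting pairs among the groups, enumerated in A's (lexicographic) order
def Spairs : List (List Int) → Int → List (Int × Int)
  | [], _ => []
  | g :: rest, i => hitsFrom g i rest (i + 1) ++ Spairs rest (i + 1)

lemma hitsFrom_shape (g1 : List Int) (i1 : Int) :
    ∀ (rest : List (List Int)) (j : Int) (p : Int × Int),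
      p ∈ hitsFrom g1 i1 rest j → p.1 = i1 ∧ j ≤ p.2 := by
  intro rest
  induction rest with
  | nil => intro j p h; simp [hitsFrom] at h
  | cons g2 rest ih =>
    intro j p h
    simp only [hitsFrom, List.mem_append] at h
    rcases h with h | h
    · split at h <;> simp_all
    · obtain ⟨h1, h2⟩ := ih (j + 1) p h
      exact ⟨h1, by omega⟩

lemma Spairs_shape :
    ∀ (l : List (List Int)) (i : Int) (p : Int × Int), p ∈ Spairs l i → i ≤ p.1 := by
  intro l
  induction l with
  | nil => intro i p h; simp [Spairs] at h
  | cons g rest ih =>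
    intro i p h
    simp only [Spairs, List.mem_append] at h
    rcases h with h | h
    · exact le_of_eq (hitsFrom_shape g i rest (i + 1) p h).1.symm
    · have := ih (i + 1) p h; omega

lemma aInner_isMin (g1 : List Int) (i1 : Int) :
    ∀ (rest : List (List Int)) (j : Int),
      IsMinOf (pvAInner g1 i1 rest j) (hitsFrom g1 i1 rest j) := by
  intro rest
  induction rest with
  | nil => intro j; simp [pvAInner, hitsFrom, IsMinOf]
  | cons g2 rest ih =>
    intro j
    by_cases hhit : pvInterHit g1 g2 = true
    · have e1 : pvAInner g1 i1 (g2 :: rest) j = some (i1, j) := by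
        simp [pvAInner, hhit]
      have e2 : hitsFrom g1 i1 (g2 :: rest) j = (i1, j) :: hitsFrom g1 i1 rest (j + 1) := by
        simp [hitsFrom, hhit]
      rw [e1, e2, IsMinOf_some]
      refine ⟨by simp, ?_⟩
      intro x hx
      rcases List.mem_cons.mp hx with rfl | hx
      · exact ltP_irrefl _
      · obtain ⟨h1, h2⟩ := hitsFrom_shape g1 i1 rest (j + 1) x hx
        simp [ltP, h1]; omega
    · have e1 : pvAInner g1 i1 (g2 :: rest) j = pvAInner g1 i1 rest (j + 1) := by
        simp [pvAInner, hhit]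
      have e2 : hitsFrom g1 i1 (g2 :: rest) j = hitsFrom g1 i1 rest (j + 1) := by
        simp [hitsFrom, hhit]
      rw [e1, e2]
      exact ih (j + 1)

lemma aOuter_isMin :
    ∀ (l : List (List Int)) (i : Int), IsMinOf (pvAOuter l i) (Spairs l i) := by
  intro l
  induction l with
  | nil => intro i; simp [pvAOuter, Spairs, IsMinOf]
  | cons g rest ih =>
    intro i
    have hinner := aInner_isMin g i rest (i + 1)
    cases hinneq : pvAInner g i rest (i + 1) with
    | none =>
      rw [hinneq] at hinner
      rw [IsMinOf_none] at hinner
      simp only [pvAOuter, hinneq, Spairs, hinner, List.nil_append]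
      exact ih (i + 1)
    | some r =>
      rw [hinneq] at hinner
      rw [IsMinOf_some] at hinner
      obtain ⟨hrmem, hrmin⟩ := hinner
      simp only [pvAOuter, hinneq, Spairs]
      rw [IsMinOf_some]
      refine ⟨List.mem_append_left _ hrmem, ?_⟩
      intro x hx
      rcases List.mem_append.mp hx with hx | hx
      · exact hrmin x hx
      · have hx1 := Spairs_shape rest (i + 1) x hx
        have hr1 := (hitsFrom_shape g i rest (i + 1) r hrmem).1
        obtain ⟨x1, x2⟩ := x; obtain ⟨r1, r2⟩ := r
        simp at hx1 hr1
        simp [ltP, hr1]; omega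

-- membership in Spairs, semantically
lemma mem_hitsFrom (g1 : List Int) (i1 : Int) :
    ∀ (rest : List (List Int)) (j : Int) (p : Int × Int),
      p ∈ hitsFrom g1 i1 rest j ↔
        ∃ k : Nat, k < rest.length ∧ pvInterHit g1 (rest.getD k []) = true ∧ p = (i1, j + (k : Int)) := by
  intro rest
  induction rest with
  | nil => intro j p; simp [hitsFrom]
  | cons g2 rest ih =>
    intro j p
    simp only [hitsFrom, List.mem_append, ih]
    constructor
    · rintro (h | ⟨k, hk, hhit, rfl⟩)
      · by_cases hh : pvInterHit g1 g2 = true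
        · rw [if_pos hh] at h
          simp at h
          subst h
          exact ⟨0, by simp, by simpa using hh, by simp⟩
        · rw [if_neg hh] at h; simp at h
      · refine ⟨k + 1, by simp; omega, by simpa using hhit, ?_⟩
        simp only [Prod.mk.injEq]
        refine ⟨?_, ?_⟩ <;> first | trivial | (push_cast; omega)
    · rintro ⟨k, hk, hhit, rfl⟩
      cases k with
      | zero =>
        left
        have hh : pvInterHit g1 g2 = true := by simpa using hhit
        rw [if_pos hh]
        simp
      | succ k =>
        right
        refine ⟨k, by simp at hk; omega, by simpa using hhit, ?_⟩
        simp only [Prod.mk.injEq]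
        refine ⟨?_, ?_⟩ <;> first | trivial | (push_cast; omega)

lemma mem_Spairs :
    ∀ (l : List (List Int)) (i : Int) (p : Int × Int),
      p ∈ Spairs l i ↔
        ∃ a b : Nat, a < b ∧ b < l.length ∧
          pvInterHit (l.getD a []) (l.getD b []) = true ∧ p = (i + (a : Int), i + (b : Int)) := by
  intro l
  induction l with
  | nil => intro i p; simp [Spairs]
  | cons g rest ih =>
    intro i p
    simp only [Spairs, List.mem_append, mem_hitsFrom, ih]
    constructor
    · rintro (⟨k, hk, hhit, rfl⟩ | ⟨a, b, hab, hb, hhit, rfl⟩)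
      · exact ⟨0, k + 1, by omega, by simpa using hk, by simpa using hhit,
          by simp only [Prod.mk.injEq]; refine ⟨?_, ?_⟩ <;> first | trivial | (push_cast; omega)⟩
      · exact ⟨a + 1, b + 1, by omega, by simpa using hb, by simpa using hhit,
          by simp only [Prod.mk.injEq]; refine ⟨?_, ?_⟩ <;> first | trivial | (push_cast; omega)⟩
    · rintro ⟨a, b, hab, hb, hhit, rfl⟩
      cases a with
      | zero =>
        left
        cases b with
        | zero => omega
        | succ b =>
          refine ⟨b, by simpa using hb, by simpa using hhit, ?_⟩
          simp only [Prod.mk.injEq]; refine ⟨?_, ?_⟩ <;> first | trivial | (push_cast; omega)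
      | succ a =>
        right
        cases b with
        | zero => omega
        | succ b =>
          refine ⟨a, b, by omega, by simpa using hb, by simpa using hhit, ?_⟩
          simp only [Prod.mk.injEq]; refine ⟨?_, ?_⟩ <;> first | trivial | (push_cast; omega)

-- ---------- B-side characterization ----------

-- index of the first group containing e (ghost specification of the dict)
def firstOcc : List (List Int) → Int → Option Nat
  | [], _ => none
  | g :: l, e => if g.contains e then some 0 else (firstOcc l e).map Nat.succ

lemma firstOcc_spec_some :
    ∀ (l : List (List Int)) (e : Int) (n : Nat), firstOcc l e = some n →
      n < l.length ∧ (l.getD n []).contains e = true := by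
  intro l
  induction l with
  | nil => intro e n h; simp [firstOcc] at h
  | cons g l ih =>
    intro e n h
    simp only [firstOcc] at h
    split at h
    · simp at h; subst h; simpa using ‹g.contains e = true›
    · cases n with
      | zero => simp at h
      | succ n =>
        simp at h
        obtain ⟨h1, h2⟩ := ih e n h
        exact ⟨by simpa using h1, by simpa using h2⟩

lemma firstOcc_spec_le :
    ∀ (l : List (List Int)) (e : Int) (k : Nat), k < l.length → (l.getD k []).contains e = true →
      ∃ n ≤ k, firstOcc l e = some n := by
  intro l
  induction l with
  | nil => intro e k h; simp at h
  | cons g l ih =>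
    intro e k hk hc
    by_cases hg : g.contains e = true
    · have hg' : e ∈ g := by simpa using hg
      exact ⟨0, by omega, by simp [firstOcc, hg']⟩
    · have hg' : e ∉ g := by simpa using hg
      cases k with
      | zero => simp at hc; exact absurd hc hg'
      | succ k =>
        obtain ⟨n, hn, hfo⟩ := ih e k (by simpa using hk) (by simpa using hc)
        exact ⟨n + 1, by omega, by simp [firstOcc, hg', hfo]⟩
lemma firstOcc_append_of_some :
    ∀ (P : List (List Int)) (g : List Int) (e : Int) (n : Nat),
      firstOcc P e = some n → firstOcc (P ++ [g]) e = some n := by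
  intro P
  induction P with
  | nil => intro g e n h; simp [firstOcc] at h
  | cons g' P ih =>
    intro g e n h
    simp only [firstOcc, List.cons_append] at h ⊢
    by_cases hc : g'.contains e = true
    · rw [if_pos hc] at h ⊢; exact h
    · rw [if_neg hc] at h ⊢
      cases hfo : firstOcc P e with
      | none => rw [hfo] at h; simp at h
      | some m =>
        rw [hfo] at h
        simp at h
        rw [ih g e m hfo]
        simp [h]

lemma firstOcc_append_of_none :
    ∀ (P : List (List Int)) (g : List Int) (e : Int),
      firstOcc P e = none →
      firstOcc (P ++ [g]) e = (if g.contains e then some P.length else none) := by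
  intro P
  induction P with
  | nil => intro g e _; simp [firstOcc]
  | cons g' P ih =>
    intro g e h
    simp only [firstOcc, List.cons_append] at h ⊢
    by_cases hc : g'.contains e = true
    · rw [if_pos hc] at h; simp at h
    · rw [if_neg hc] at h ⊢
      cases hfo : firstOcc P e with
      | some m => rw [hfo] at h; simp at h
      | none =>
        rw [ih g e hfo]
        split <;> simp

-- the dict 'first' corresponds to firstOcc of the processed groups (partial last group included)
def DInv (first : PySem.Dict Int Int) (pref : List (List Int)) : Prop :=
  ∀ e, first.get? e = (firstOcc pref e).map (fun n => (n : Int))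

-- appending an element that already occurs does not change first occurrences
lemma firstOcc_snoc_ne (P : List (List Int)) (g0 : List Int) (e x : Int) (hxe : x ≠ e) :
    firstOcc (P ++ [g0 ++ [e]]) x = firstOcc (P ++ [g0]) x := by
  cases hP : firstOcc P x with
  | some n => rw [firstOcc_append_of_some P _ x n hP, firstOcc_append_of_some P _ x n hP]
  | none =>
    rw [firstOcc_append_of_none P _ x hP, firstOcc_append_of_none P _ x hP]
    have hcont : (g0 ++ [e]).contains x = g0.contains x := by
      simp [hxe]
    rw [hcont]

lemma Inv_extend_mem {first : PySem.Dict Int Int} {P : List (List Int)} {g0 : List Int}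
    {e : Int} {i : Int} (hInv : DInv first (P ++ [g0])) (h : first.get? e = some i) :
    DInv first (P ++ [g0 ++ [e]]) := by
  have hsome : firstOcc (P ++ [g0]) e ≠ none := by
    intro hn
    have he := hInv e
    rw [h, hn] at he
    simp at he
  intro x
  rw [hInv x]
  by_cases hxe : x = e
  · subst hxe
    congr 1
    cases hP : firstOcc P x with
    | some n => rw [firstOcc_append_of_some P _ x n hP, firstOcc_append_of_some P _ x n hP]
    | none =>
      rw [firstOcc_append_of_none P _ x hP] at hsome ⊢
      rw [firstOcc_append_of_none P _ x hP]
      by_cases hg : g0.contains x = true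
      · have hg' : (g0 ++ [x]).contains x = true := by simp
        rw [if_pos hg', if_pos hg]
      · rw [if_neg hg] at hsome; exact absurd rfl hsome
  · rw [firstOcc_snoc_ne P g0 e x hxe]

lemma Inv_insert_new {first : PySem.Dict Int Int} {P : List (List Int)} {g0 : List Int}
    {e : Int} (hInv : DInv first (P ++ [g0])) (h : first.get? e = none) :
    DInv (first.insert e ((P.length : Int))) (P ++ [g0 ++ [e]]) := by
  have hnone : firstOcc (P ++ [g0]) e = none := by
    have he := hInv e
    rw [h] at he
    cases hfo : firstOcc (P ++ [g0]) e with
    | some n => rw [hfo] at he; simp at he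
    | none => rfl
  have hPe : firstOcc P e = none := by
    cases hP : firstOcc P e with
    | some n => rw [firstOcc_append_of_some P g0 e n hP] at hnone; simp at hnone
    | none => rfl
  intro x
  rw [PySem.Dict.get?_insert]
  by_cases hxe : x = e
  · subst hxe
    rw [if_pos rfl, firstOcc_append_of_none P _ x hPe]
    have : (g0 ++ [x]).contains x = true := by simp
    rw [if_pos this]
    rfl
  · rw [if_neg hxe, hInv x, firstOcc_snoc_ne P g0 e x hxe]
def innerC : List Int → Int → PySem.Dict Int Int → PySem.Dict Int Int × List (Int × Int)
  | [], _, first => (first, [])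
  | e :: es, j, first =>
    match first.get? e with
    | some i =>
      let r := innerC es j first
      (r.1, (if i == j then ([] : List (Int × Int)) else [(i, j)]) ++ r.2)
    | none => innerC es j (first.insert e j)

lemma bInner_eq (j : Int) :
    ∀ (g : List Int) (first : PySem.Dict Int Int) (best : Option (Int × Int)),
      pvBInner j g first best =
        ((innerC g j first).1, ((innerC g j first).2).foldl pvBBest best) := by
  intro g
  induction g with
  | nil => intro first best; simp [pvBInner, innerC]
  | cons e es ih =>
    intro first best
    simp only [pvBInner, innerC]
    cases h : first.get? e with
    | some i =>
      by_cases hij : i == j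
      · simp only [hij, if_pos, ih]
        simp
      · simp only [ih]
        simp [hij]
    | none => simp [ih]

def CandsB : List (List Int) → Int → PySem.Dict Int Int → List (Int × Int)
  | [], _, _ => []
  | g :: rest, j, first => (innerC g j first).2 ++ CandsB rest (j + 1) (innerC g j first).1

lemma bOuter_eq :
    ∀ (rest : List (List Int)) (j : Int) (first : PySem.Dict Int Int) (best : Option (Int × Int)),
      pvBOuter rest j first best = (CandsB rest j first).foldl pvBBest best := by
  intro rest
  induction rest with
  | nil => intro j first best; simp [pvBOuter, CandsB]
  | cons g rest ih =>
    intro j first best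
    simp only [pvBOuter, CandsB, bInner_eq, List.foldl_append]
    exact ih (j + 1) _ _

lemma innerC_snd (P : List (List Int)) :
    ∀ (g : List Int) (g0 : List Int) (first : PySem.Dict Int Int),
      DInv first (P ++ [g0]) →
      (innerC g ((P.length : Int)) first).2 =
        g.filterMap (fun e => (firstOcc P e).map (fun n => ((n : Int), ((P.length : Nat) : Int)))) := by
  intro g
  induction g with
  | nil => intro g0 first _; simp [innerC]
  | cons e es ih =>
    intro g0 first hInv
    have he := hInv e
    cases hge : first.get? e with
    | some i =>
      rw [hge] at he
      simp only [innerC, hge, List.filterMap_cons]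
      cases hP : firstOcc P e with
      | some n =>
        rw [firstOcc_append_of_some P g0 e n hP] at he
        have hin : i = ((n : Nat) : Int) := by simpa using he
        subst hin
        have hn := (firstOcc_spec_some P e n hP).1
        have hne : (((n : Nat) : Int) == ((P.length : Int))) = false := by
          rw [beq_eq_false_iff_ne]
          intro hEq
          omega
        rw [ih g0 first hInv]
        simp [hne]
      | none =>
        rw [firstOcc_append_of_none P g0 e hP] at he
        by_cases hg : g0.contains e = true
        · rw [if_pos hg] at he
          have hin : i = ((P.length : Nat) : Int) := by simpa using he
          subst hin
          rw [ih (g0 ++ [e]) first (Inv_extend_mem hInv hge)]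
          simp
        · rw [if_neg hg] at he; simp at he
    | none =>
      have hnone : firstOcc (P ++ [g0]) e = none := by
        rw [hge] at he
        cases hfo : firstOcc (P ++ [g0]) e with
        | some n => rw [hfo] at he; simp at he
        | none => rfl
      have hP : firstOcc P e = none := by
        cases hP : firstOcc P e with
        | some n => rw [firstOcc_append_of_some P g0 e n hP] at hnone; simp at hnone
        | none => rfl
      simp only [innerC, hge, List.filterMap_cons, hP]
      exact ih (g0 ++ [e]) _ (Inv_insert_new hInv hge)

lemma innerC_fst (P : List (List Int)) :
    ∀ (g : List Int) (g0 : List Int) (first : PySem.Dict Int Int),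
      DInv first (P ++ [g0]) →
      DInv (innerC g ((P.length : Int)) first).1 (P ++ [g0 ++ g]) := by
  intro g
  induction g with
  | nil => intro g0 first hInv; simpa [innerC] using hInv
  | cons e es ih =>
    intro g0 first hInv
    cases hge : first.get? e with
    | some i =>
      have := ih (g0 ++ [e]) first (Inv_extend_mem hInv hge)
      simp only [innerC, hge]
      simpa [List.append_assoc] using this
    | none =>
      have := ih (g0 ++ [e]) _ (Inv_insert_new hInv hge)
      simp only [innerC, hge]
      simpa [List.append_assoc] using this

-- firstOcc over the prefix with an empty partial group
lemma firstOcc_append_nil (P : List (List Int)) (e : Int) :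
    firstOcc (P ++ [[]]) e = firstOcc P e := by
  cases hP : firstOcc P e with
  | some n => exact firstOcc_append_of_some P [] e n hP
  | none => rw [firstOcc_append_of_none P [] e hP]; simp

-- the candidate pairs, expressed purely in terms of the input
def SemC (P : List (List Int)) : List (List Int) → List (Int × Int)
  | [] => []
  | g :: rest =>
    g.filterMap (fun e => (firstOcc P e).map (fun n => ((n : Int), ((P.length : Nat) : Int))))
      ++ SemC (P ++ [g]) rest

lemma CandsB_eq :
    ∀ (rest : List (List Int)) (P : List (List Int)) (first : PySem.Dict Int Int),
      DInv first P → CandsB rest ((P.length : Int)) first = SemC P rest := by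
  intro rest
  induction rest with
  | nil => intro P first _; simp [CandsB, SemC]
  | cons g rest ih =>
    intro P first hInv
    have hInv' : DInv first (P ++ [[]]) := by
      intro e; rw [hInv e, firstOcc_append_nil]
    simp only [CandsB, SemC]
    rw [innerC_snd P g [] first hInv']
    congr 1
    have hfst := innerC_fst P g [] first hInv'
    simp only [List.nil_append] at hfst
    have hlen : ((P.length : Int) + 1) = (((P ++ [g]).length : Nat) : Int) := by
      simp
    rw [hlen]
    exact ih (P ++ [g]) _ hfst

lemma mem_SemC :
    ∀ (rest P : List (List Int)) (p : Int × Int),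
      p ∈ SemC P rest ↔
        ∃ k : Nat, k < rest.length ∧ ∃ e ∈ rest.getD k [],
          ∃ n : Nat, firstOcc (P ++ rest.take k) e = some n ∧
            p = ((n : Int), ((P.length + k : Nat) : Int)) := by
  intro rest
  induction rest with
  | nil => intro P p; simp [SemC]
  | cons g rest ih =>
    intro P p
    simp only [SemC, List.mem_append, List.mem_filterMap, ih]
    constructor
    · rintro (⟨e, he, hmap⟩ | ⟨k, hk, e, he, n, hfo, rfl⟩)
      · cases hP : firstOcc P e with
        | none => simp [hP] at hmap
        | some n =>
          rw [hP] at hmap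
          have hpv : p = ((n : Int), ((P.length : Nat) : Int)) := by
            have := hmap
            simp at this
            exact this.symm
          exact ⟨0, by simp, e, by simpa using he, n, by simpa using hP, by simp [hpv]⟩
      · refine ⟨k + 1, by simpa using hk, e, by simpa using he, n, ?_, ?_⟩
        · rw [List.take_succ_cons, List.append_cons]
          exact hfo
        · simp only [Prod.mk.injEq]
          refine ⟨?_, ?_⟩ <;> first | trivial | (push_cast; simp; omega)
    · rintro ⟨k, hk, e, he, n, hfo, rfl⟩
      cases k with
      | zero =>
        left
        refine ⟨e, by simpa using he, ?_⟩
        simp only [List.take_zero, List.append_nil] at hfo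
        simp [hfo]
      | succ k =>
        right
        refine ⟨k, by simpa using hk, e, by simpa using he, n, ?_, ?_⟩
        · rw [List.take_succ_cons, List.append_cons] at hfo
          exact hfo
        · simp only [Prod.mk.injEq]
          refine ⟨?_, ?_⟩ <;> first | trivial | (push_cast; simp; omega)

-- membership in the take prefix
lemma getD_take (l : List (List Int)) (k m : Nat) (h : m < k) :
    (l.take k).getD m [] = l.getD m [] := by
  by_cases hm : m < l.length
  · rw [List.getD_eq_getElem _ _ (by simp; omega), List.getD_eq_getElem _ _ hm]
    exact List.getElem_take
  · rw [List.getD_eq_default _ _ (by simp; omega), List.getD_eq_default _ _ (by omega)]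

lemma pvInterHit_of_mem {g1 g2 : List Int} {e : Int} (h1 : e ∈ g1) (h2 : e ∈ g2) :
    pvInterHit g1 g2 = true := by
  simp only [pvInterHit, List.any_eq_true]
  exact ⟨e, h1, by simpa using h2⟩

lemma pvInterHit_exists {g1 g2 : List Int} (h : pvInterHit g1 g2 = true) :
    ∃ e, e ∈ g1 ∧ e ∈ g2 := by
  simp only [pvInterHit, List.any_eq_true] at h
  obtain ⟨e, he1, he2⟩ := h
  exact ⟨e, he1, by simpa using he2⟩

-- ---------- assembly ----------

lemma main_eq (groups : List (List Int)) :
    pvAOuter groups 0 = pvBOuter groups 0 PySem.Dict.empty none := by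
  have hInvEmpty : DInv PySem.Dict.empty [] := by
    intro e; simp [firstOcc, PySem.Dict.get?_empty]
  have hB : pvBOuter groups 0 PySem.Dict.empty none
      = (SemC [] groups).foldl pvBBest none := by
    rw [bOuter_eq]
    congr 1
    have := CandsB_eq groups [] PySem.Dict.empty hInvEmpty
    simpa using this
  rw [hB]
  have hBmin : IsMinOf ((SemC [] groups).foldl pvBBest none) (SemC [] groups) :=
    foldl_best_isMin _
  have hAmin : IsMinOf (pvAOuter groups 0) (Spairs groups 0) := aOuter_isMin groups 0
  -- transfer: the min of the candidate list is the min of the intersecting-pair list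
  have hBmin' : IsMinOf ((SemC [] groups).foldl pvBBest none) (Spairs groups 0) := by
    apply isMinOf_transfer hBmin
    · -- every candidate is an intersecting pair
      intro p hp
      rw [mem_SemC] at hp
      obtain ⟨k, hk, e, he, n, hfo, rfl⟩ := hp
      simp only [List.nil_append] at hfo
      obtain ⟨hn, hcont⟩ := firstOcc_spec_some _ e n hfo
      have hnk : n < k := by
        rw [List.length_take] at hn
        omega
      rw [getD_take groups k n hnk] at hcont
      rw [mem_Spairs]
      refine ⟨n, k, hnk, hk, ?_, ?_⟩
      · exact pvInterHit_of_mem (by simpa using hcont) he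
      · simp
    · -- every intersecting pair is dominated by a candidate
      intro p hp
      rw [mem_Spairs] at hp
      obtain ⟨a, b, hab, hb, hhit, rfl⟩ := hp
      obtain ⟨e, he1, he2⟩ := pvInterHit_exists hhit
      have hlen : a < (groups.take b).length := by simp; omega
      have hcont : ((groups.take b).getD a []).contains e = true := by
        rw [getD_take groups b a hab]; simpa using he1
      obtain ⟨m, hm, hfo⟩ := firstOcc_spec_le (groups.take b) e a hlen hcont
      refine ⟨((m : Int), ((b : Nat) : Int)), ?_, ?_⟩
      · rw [mem_SemC]
        exact ⟨b, hb, e, he2, m, by simpa using hfo, by simp⟩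
      · simp [ltP]
        omega
  exact isMinOf_unique hAmin hBmin'

-- ===== VERDICT (by name: the statement is the Claim_ definition above) =====
theorem indexes_that_can_be_merged_py_spec : Claim_equal_indexes_that_can_be_merged_py := by
  intro groups _
  unfold Spec_indexes_that_can_be_merged_py
  unfold indexes_that_can_be_merged_py indexes_that_can_be_merged_py_alt
  rw [main_eq groups]
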